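-- pv_equiv track=rewrite | github.com/CAMANEM/CE-TEC-2015 | Intro y Taller de Programacion/Examenes/I Parcial 2015/Pablo David Garcia Brenes Parcial I.py | aux_paridad
-- ===== SOURCE A (Python) =====
-- def aux_paridad(Hilera):
--     if Hilera==[]:  #Agregue :
--         return 0
--     else:
--         if Hilera[0]==1:
--             return 1+aux_paridad(Hilera[1:])
--         else:
--             return aux_paridad(Hilera[1:])
-- ===== SOURCE B (Python) =====
-- def aux_paridad(Hilera):
--     contador = 0
--     for elemento in Hilera:
--         if elemento == 1:
--             contador += 1
--     return contador
-- ===== Notes on version B (the rewrite author's own statement) =====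
-- stated objective: simpler
-- what changed: Replaces A's self-recursion with repeated list slicing by a single iterative accumulator loop over the elements.
import Mathlib
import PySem

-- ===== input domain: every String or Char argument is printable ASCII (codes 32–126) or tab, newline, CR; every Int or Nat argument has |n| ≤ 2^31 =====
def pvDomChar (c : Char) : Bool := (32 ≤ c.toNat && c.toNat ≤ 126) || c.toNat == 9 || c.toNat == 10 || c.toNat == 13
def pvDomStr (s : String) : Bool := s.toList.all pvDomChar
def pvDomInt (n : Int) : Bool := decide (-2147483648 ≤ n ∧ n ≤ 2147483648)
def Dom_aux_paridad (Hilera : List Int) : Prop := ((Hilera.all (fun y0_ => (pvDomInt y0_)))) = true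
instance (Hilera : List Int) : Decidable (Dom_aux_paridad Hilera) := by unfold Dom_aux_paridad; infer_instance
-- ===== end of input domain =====

-- B replaces A's tail-slicing recursion by a single accumulator fold; alternative decomposition.


-- ===== PORT A =====
-- A: recursion on the list, 1 + recurse on the tail when the head is 1
def aux_paridad (Hilera : List Int) : Int :=
  match Hilera with
  | [] => 0
  | x :: rest => if x == 1 then 1 + aux_paridad rest else aux_paridad rest

-- ===== PORT B =====
-- B: iterative accumulator loop (for-loop with a counter)
def aux_paridad_alt (Hilera : List Int) : Int :=
  Hilera.foldl (fun contador elemento => if elemento == 1 then contador + 1 else contador) 0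

-- ===== PRECONDITION & SPEC =====
def Spec_aux_paridad (Hilera : List Int) (out : Int) : Prop := out = aux_paridad_alt Hilera
instance (Hilera : List Int) (out : Int) : Decidable (Spec_aux_paridad Hilera out) := by unfold Spec_aux_paridad; infer_instance

-- ===== CLAIM (what is proved, stated in full; the proofs are below) =====
def Claim_equal_aux_paridad : Prop := ∀ (Hilera : List Int), Dom_aux_paridad Hilera → Spec_aux_paridad Hilera (aux_paridad Hilera)

-- ===== LEMMAS AND PROOFS =====

-- ===== VERDICT (by name: the statement is the Claim_ definition above) =====
theorem foldl_count_shift (Hilera : List Int) (c : Int) :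
    Hilera.foldl (fun contador elemento => if elemento == 1 then contador + 1 else contador) c
      = c + Hilera.foldl (fun contador elemento => if elemento == 1 then contador + 1 else contador) 0 := by
  induction Hilera generalizing c with
  | nil => simp
  | cons x rest ih =>
    simp only [List.foldl_cons]
    rw [ih, ih (if x == 1 then 0 + 1 else 0)]
    split <;> ring

theorem aux_paridad_spec : Claim_equal_aux_paridad := by
  intro Hilera hD; clear hD
  unfold Spec_aux_paridad aux_paridad_alt
  induction Hilera with
  | nil => simp [aux_paridad]
  | cons x rest ih =>
    simp only [aux_paridad, List.foldl_cons]
    rw [foldl_count_shift, ← ih]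
    split <;> ring
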